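-- pv_equiv track=rewrite | github.com/mthrok/rosalind | problems/sign.py | assign_sign
-- ===== SOURCE A (Python) =====
-- def assign_sign(pattern):
--     l_pattern = len(pattern)
--     ret = []
--     for i_sign in range(2 ** l_pattern):
--         new_pattern = []
--         for ind in range(l_pattern):
--             val = pattern[ind]
--             if i_sign % 2:
--                 val *= -1
--             new_pattern.append(val)
--             i_sign //= 2
--         ret.append(new_pattern)
--     return ret
-- ===== SOURCE B (Python) =====
-- def assign_sign(pattern):
--     ret = [[]]
--     for x in pattern:
--         ret = [c + [e] for e in (x, -x) for c in ret]
--     return ret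
-- ===== Notes on version B (the rewrite author's own statement) =====
-- stated objective: simpler
-- what changed: Replaces A's enumeration of integers 0..2^n-1 with per-element bit decoding (mod/floordiv inside a nested index loop) by incremental doubling: start from the single empty combination and, for each element, rebuild the list with the +x copies followed by the -x copies, preserving A's output order.
import Mathlib
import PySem

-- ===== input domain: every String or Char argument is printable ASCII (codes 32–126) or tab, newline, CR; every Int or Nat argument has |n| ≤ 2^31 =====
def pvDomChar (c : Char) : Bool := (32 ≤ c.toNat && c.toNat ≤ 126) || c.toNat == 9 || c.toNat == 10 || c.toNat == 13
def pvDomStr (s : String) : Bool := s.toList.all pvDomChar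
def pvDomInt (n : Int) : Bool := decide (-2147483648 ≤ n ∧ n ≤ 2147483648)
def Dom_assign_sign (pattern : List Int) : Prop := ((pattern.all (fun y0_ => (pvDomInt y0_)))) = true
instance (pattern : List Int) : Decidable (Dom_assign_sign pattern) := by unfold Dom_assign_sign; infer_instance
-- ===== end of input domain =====

-- B replaces A's integer bit-pattern decoding by incremental doubling of the
-- combination list (same output order); objective: simpler.

-- ===== PORT A =====
def assign_sign (pattern : List Int) : List (List Int) :=
  let l_pattern := pattern.length
  (PySem.List.pyRange 0 ((2 : Int) ^ l_pattern) 1).foldl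
    (fun ret i_sign =>
      let st := (PySem.List.pyRange 0 (l_pattern : Int) 1).foldl
        (fun (st : List Int × Int) ind =>
          -- pattern[ind]: ind ∈ range(len(pattern)) is always in range, so pyGetD is exact here
          let val : Int := PySem.List.pyGetD pattern ind 0
          (st.1 ++ [if PySem.Int.mod st.2 2 ≠ 0 then val * (-1) else val],
           PySem.Int.floordiv st.2 2))
        ([], i_sign)
      ret ++ [st.1])
    []

-- ===== PORT B =====
def assign_sign_alt (pattern : List Int) : List (List Int) :=
  pattern.foldl
    (fun ret x => [x, -x].flatMap (fun e => ret.map (fun c => c ++ [e])))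
    [[]]

-- ===== PRECONDITION & SPEC =====
def Spec_assign_sign (pattern : List Int) (out : List (List Int)) : Prop := out = assign_sign_alt pattern
instance (pattern : List Int) (out : List (List Int)) : Decidable (Spec_assign_sign pattern out) := by unfold Spec_assign_sign; infer_instance

-- ===== CLAIM (what is proved, stated in full; the proofs are below) =====
def Claim_equal_assign_sign : Prop := ∀ (pattern : List Int), Dom_assign_sign pattern → Spec_assign_sign pattern (assign_sign pattern)

-- ===== LEMMAS AND PROOFS =====

/-- Reference decoder: the sign pattern selected by the bits of `s`
    (bit 0 flips the first element), shared characterisation of both ports. -/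
def pvDec (xs : List Int) (s : Nat) : List Int :=
  match xs with
  | [] => []
  | x :: rest => (if s % 2 = 1 then -x else x) :: pvDec rest (s / 2)

lemma pvInner (xs : List Int) : ∀ (acc : List Int) (s : Nat),
    (xs.foldl
      (fun (st : List Int × Int) v =>
        (st.1 ++ [if PySem.Int.mod st.2 2 ≠ 0 then v * (-1) else v],
         PySem.Int.floordiv st.2 2))
      (acc, (s : Int))).1 = acc ++ pvDec xs s := by
  induction xs with
  | nil => intro acc s; simp [pvDec]
  | cons x rest ih =>
    intro acc s
    have hd : PySem.Int.floordiv (s : Int) 2 = ((s / 2 : Nat) : Int) := by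
      exact_mod_cast PySem.Int.floordiv_natCast s 2
    have hval : (if PySem.Int.mod (s : Int) 2 ≠ 0 then x * (-1) else x)
        = (if s % 2 = 1 then -x else x) := by
      have hm : PySem.Int.mod (s : Int) 2 = ((s % 2 : Nat) : Int) := by
        exact_mod_cast PySem.Int.mod_natCast s 2
      rw [hm]
      rcases Nat.mod_two_eq_zero_or_one s with h | h <;> simp [h]
    simp only [List.foldl_cons, hval, hd]
    rw [ih]
    simp [pvDec]

lemma pvDec_snoc (xs : List Int) (x : Int) : ∀ s : Nat,
    pvDec (xs ++ [x]) s
      = pvDec xs s ++ [if (s / 2 ^ xs.length) % 2 = 1 then -x else x] := by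
  induction xs with
  | nil => intro s; simp [pvDec]
  | cons y rest ih =>
    intro s
    simp only [List.cons_append, pvDec, ih (s / 2), List.length_cons]
    have : s / 2 / 2 ^ rest.length = s / 2 ^ (rest.length + 1) := by
      rw [Nat.div_div_eq_div_mul, pow_succ, mul_comm, mul_comm (2 ^ rest.length) 2]
    rw [this]
    simp

lemma pvDec_high (xs : List Int) : ∀ j : Nat,
    pvDec xs (2 ^ xs.length + j) = pvDec xs j := by
  induction xs with
  | nil => intro j; simp [pvDec]
  | cons x rest ih =>
    intro j
    have h2 : (2 : Nat) ^ (rest.length + 1) = 2 * 2 ^ rest.length := by ring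
    have hm : (2 ^ (rest.length + 1) + j) % 2 = j % 2 := by omega
    have hd : (2 ^ (rest.length + 1) + j) / 2 = 2 ^ rest.length + j / 2 := by omega
    simp only [pvDec, List.length_cons, hm, hd, ih]

lemma portA_eq (pattern : List Int) :
    assign_sign pattern = (List.range (2 ^ pattern.length)).map (pvDec pattern) := by
  have hcast : ((2 : Int) ^ pattern.length) = ((2 ^ pattern.length : Nat) : Int) := by
    push_cast; ring
  unfold assign_sign
  simp only [PySem.List.foldl_append_singleton_eq_map, List.nil_append]
  rw [hcast, PySem.List.pyRange_zero_nat (2 ^ pattern.length), List.map_map]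
  apply List.map_congr_left
  intro k _
  have hinner :
      (PySem.List.pyRange 0 (pattern.length : Int) 1).foldl
        (fun (st : List Int × Int) ind =>
          (st.1 ++ [if PySem.Int.mod st.2 2 ≠ 0 then PySem.List.pyGetD pattern ind 0 * (-1)
            else PySem.List.pyGetD pattern ind 0],
           PySem.Int.floordiv st.2 2))
        ([], (k : Int))
      = pattern.foldl
        (fun (st : List Int × Int) v =>
          (st.1 ++ [if PySem.Int.mod st.2 2 ≠ 0 then v * (-1) else v],
           PySem.Int.floordiv st.2 2))
        ([], (k : Int)) :=
    PySem.List.foldl_pyRange_zero_pyGetD' pattern 0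
      (fun (st : List Int × Int) v =>
        (st.1 ++ [if PySem.Int.mod st.2 2 ≠ 0 then v * (-1) else v],
         PySem.Int.floordiv st.2 2)) ([], (k : Int))
  simp only [Function.comp_apply, hinner, pvInner pattern [] k, List.nil_append]

lemma portB_eq (pattern : List Int) :
    assign_sign_alt pattern = (List.range (2 ^ pattern.length)).map (pvDec pattern) := by
  induction pattern using List.reverseRecOn with
  | nil => simp [assign_sign_alt, pvDec]
  | append_singleton xs x ih =>
    have hstep : assign_sign_alt (xs ++ [x])
        = (assign_sign_alt xs).map (fun c => c ++ [x])
          ++ (assign_sign_alt xs).map (fun c => c ++ [-x]) := by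
      unfold assign_sign_alt
      rw [List.foldl_append]
      simp [List.flatMap]
    rw [hstep, ih]
    have hlen : (xs ++ [x]).length = xs.length + 1 := by simp
    have hpow : (2 : Nat) ^ (xs.length + 1) = 2 ^ xs.length + 2 ^ xs.length := by ring
    rw [hlen, hpow, List.range_add, List.map_append]
    congr 1
    · -- low half: bit xs.length is 0
      rw [List.map_map]
      apply List.map_congr_left
      intro k hk
      rw [List.mem_range] at hk
      simp only [Function.comp_apply, pvDec_snoc]
      rw [Nat.div_eq_of_lt hk]
      simp
    · -- high half: bit xs.length is 1
      have hmm : List.map (pvDec (xs ++ [x]))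
            (List.map (fun k => 2 ^ xs.length + k) (List.range (2 ^ xs.length)))
          = List.map (fun k => pvDec (xs ++ [x]) (2 ^ xs.length + k))
            (List.range (2 ^ xs.length)) := by
        simp
      rw [List.map_map, hmm]
      apply List.map_congr_left
      intro k hk
      rw [List.mem_range] at hk
      simp only [Function.comp_apply, pvDec_snoc]
      have h1 : (2 ^ xs.length + k) / 2 ^ xs.length = 1 := by
        rw [Nat.add_comm, Nat.add_div_right _ (Nat.pow_pos (by norm_num)),
          Nat.div_eq_of_lt hk]
      rw [pvDec_high, h1]
      simp

-- ===== VERDICT (by name: the statement is the Claim_ definition above) =====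
theorem assign_sign_spec : Claim_equal_assign_sign := by
  intro pattern _
  unfold Spec_assign_sign
  rw [portA_eq, portB_eq]
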